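-- pv_equiv track=rewrite | github.com/jeevandas-jd/SimuHome | src/pipelines/episode_generation/qt2/feasible_builder.py | _has_conflicting_goal_directions
-- ===== SOURCE A (Python) =====
-- from typing import Any, Dict, List
--
-- def _has_conflicting_goal_directions(goals: List[Dict[str, Any]]) -> bool:
--     direction_by_key: Dict[tuple[str, str], str] = {}
--     for goal in goals:
--         room_id = str(goal.get("room_id", ""))
--         room_state = str(goal.get("room_state", ""))
--         direction = str(goal.get("direction", ""))
--         key = (room_id, room_state)
--         previous_direction = direction_by_key.get(key)
--         if previous_direction is None:
--             direction_by_key[key] = direction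
--             continue
--         if previous_direction != direction:
--             return True
--     return False
-- ===== SOURCE B (Python) =====
-- def _has_conflicting_goal_directions(goals):
--     pairs = {
--         ((str(g.get("room_id", "")), str(g.get("room_state", ""))), str(g.get("direction", "")))
--         for g in goals
--     }
--     return len(pairs) > len({key for key, _ in pairs})
-- ===== Notes on version B (the rewrite author's own statement) =====
-- stated objective: alternative
-- what changed: Replaces A's single-pass dict of representative directions with early exit by a set-cardinality test: collect the set of distinct ((room_id, room_state), direction) pairs and report a conflict iff there are more distinct pairs than distinct keys.
import Mathlib
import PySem

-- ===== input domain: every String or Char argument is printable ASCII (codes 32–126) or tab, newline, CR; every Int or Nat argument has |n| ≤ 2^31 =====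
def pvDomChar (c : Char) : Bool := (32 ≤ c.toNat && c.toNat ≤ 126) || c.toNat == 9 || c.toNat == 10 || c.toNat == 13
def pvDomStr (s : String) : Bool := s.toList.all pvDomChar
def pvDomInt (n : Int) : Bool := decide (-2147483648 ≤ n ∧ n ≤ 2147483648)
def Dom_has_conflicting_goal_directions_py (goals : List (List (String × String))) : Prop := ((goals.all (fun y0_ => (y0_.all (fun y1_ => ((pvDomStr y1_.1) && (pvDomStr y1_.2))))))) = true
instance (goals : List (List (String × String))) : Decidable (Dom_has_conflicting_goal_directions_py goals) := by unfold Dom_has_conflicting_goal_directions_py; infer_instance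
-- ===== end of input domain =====

-- B replaces A's incremental dict-of-representatives with early exit by a cardinality test:
-- conflict iff the set of distinct (key, direction) pairs is larger than the set of distinct keys.


-- ===== PORT A =====
-- goal.get("…", "") on a str-valued dict; str(·) on a str is the identity, so the coercions vanish
def pvGoalKey (goal : List (String × String)) : String × String :=
  ((PySem.Dict.mk goal).getD "room_id" "", (PySem.Dict.mk goal).getD "room_state" "")

def pvGoalDir (goal : List (String × String)) : String :=
  (PySem.Dict.mk goal).getD "direction" ""

-- A's loop over goals, carrying direction_by_key
def pvALoop : PySem.Dict (String × String) String → List (List (String × String)) → Bool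
  | _, [] => false
  | d, goal :: rest =>
    let key := pvGoalKey goal
    let direction := pvGoalDir goal
    match d.get? key with
    | none => pvALoop (d.insert key direction) rest
    | some previous => if previous ≠ direction then true else pvALoop d rest

def has_conflicting_goal_directions_py (goals : List (List (String × String))) : Bool :=
  pvALoop PySem.Dict.empty goals

-- ===== PORT B =====
-- the set comprehension {(key(g), dir(g)) for g in goals}, then {k for k, _ in pairs}, then len > len
def has_conflicting_goal_directions_py_alt (goals : List (List (String × String))) : Bool :=
  let pairs : PySem.Set ((String × String) × String) :=
    PySem.Set.ofList (goals.map (fun g => (pvGoalKey g, pvGoalDir g)))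
  let keys : PySem.Set (String × String) := PySem.Set.ofList (pairs.map Prod.fst)
  decide (PySem.Set.len keys < PySem.Set.len pairs)

-- ===== PRECONDITION & SPEC =====
def Spec_has_conflicting_goal_directions_py (goals : List (List (String × String))) (out : Bool) : Prop := out = has_conflicting_goal_directions_py_alt goals
instance (goals : List (List (String × String))) (out : Bool) : Decidable (Spec_has_conflicting_goal_directions_py goals out) := by unfold Spec_has_conflicting_goal_directions_py; infer_instance

-- ===== CLAIM (what is proved, stated in full; the proofs are below) =====
def Claim_equal_has_conflicting_goal_directions_py : Prop := ∀ (goals : List (List (String × String))), Dom_has_conflicting_goal_directions_py goals → Spec_has_conflicting_goal_directions_py goals (has_conflicting_goal_directions_py goals)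

-- ===== LEMMAS AND PROOFS =====

-- deduplicating a list with a duplicate makes it strictly shorter
theorem pv_length_ofList_lt {α : Type} [BEq α] [LawfulBEq α] (l : List α) (h : ¬ l.Nodup) :
    (PySem.Set.ofList l).length < l.length := by
  induction l with
  | nil => simp at h
  | cons x xs ih =>
    rw [PySem.Set.ofList_cons]
    simp only [List.length_cons, List.nodup_cons, not_and_or] at h ⊢
    rcases h with hx | hnd
    · push Not at hx
      have hmem : x ∈ PySem.Set.ofList xs := (PySem.Set.mem_ofList xs x).mpr hx
      have : (PySem.Set.discard (PySem.Set.ofList xs) x).length < (PySem.Set.ofList xs).length := by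
        simp only [PySem.Set.discard]
        rw [List.length_filter_lt_length_iff_exists]
        exact ⟨x, hmem, by simp⟩
      have h2 := PySem.Set.length_ofList_le xs
      omega
    · have h2 : (PySem.Set.discard (PySem.Set.ofList xs) x).length ≤ (PySem.Set.ofList xs).length := by
        simp only [PySem.Set.discard]; exact List.length_filter_le _ _
      have := ih hnd
      omega

-- two distinct members with the same first component kill Nodup of the fst-map
theorem pv_not_nodup_map_fst {α β : Type} (l : List (α × β)) (p q : α × β)
    (hp : p ∈ l) (hq : q ∈ l) (hne : p ≠ q) (hf : p.1 = q.1) : ¬ (l.map Prod.fst).Nodup := by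
  intro hnd
  exact hne (List.inj_on_of_nodup_map hnd hp hq hf)

-- main invariant: A's loop answers "are the keys of the final pair-set duplicated?"
theorem pv_main (gs : List (List (String × String)))
    (d : PySem.Dict (String × String) String) (hk : d.keys.Nodup) :
    pvALoop d gs
      = decide (¬ ((PySem.Set.update d.items
          (gs.map (fun g => (pvGoalKey g, pvGoalDir g)))).map Prod.fst).Nodup) := by
  induction gs generalizing d with
  | nil =>
    simp only [List.map_nil, PySem.Set.update_nil, pvALoop]
    have : d.keys = d.items.map Prod.fst := by simp [PySem.Dict.keys]
    rw [this] at hk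
    simp [hk]
  | cons goal rest ih =>
    simp only [List.map_cons, PySem.Set.update_cons, pvALoop]
    cases hg : d.get? (pvGoalKey goal) with
    | none =>
      have hnc : d.contains (pvGoalKey goal) = false :=
        (PySem.Dict.get?_eq_none_iff_contains d _).mp hg
      have hni : (pvGoalKey goal, pvGoalDir goal) ∉ d.items := by
        intro hmem
        have := PySem.Dict.mem_keys_of_mem_items d hmem
        rw [← PySem.Dict.contains_iff_mem_keys] at this
        simp [hnc] at this
      have hit : PySem.Set.add d.items (pvGoalKey goal, pvGoalDir goal)
          = (d.insert (pvGoalKey goal) (pvGoalDir goal)).items := by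
        rw [PySem.Set.add_of_not_mem hni, PySem.Dict.items_insert_of_not_contains d _ hnc]
      simp only [hit]
      exact ih _ (PySem.Dict.nodup_keys_insert _ _ _ hk)
    | some previous =>
      by_cases hpd : previous = pvGoalDir goal
      · simp only [hpd, ne_eq, not_true_eq_false, if_false]
        have hmem : (pvGoalKey goal, pvGoalDir goal) ∈ d.items :=
          PySem.Dict.mem_items_of_get?_eq_some d (hpd ▸ hg)
        simp only [PySem.Set.add_of_mem hmem]
        exact ih _ hk
      · simp only [ne_eq, hpd, not_false_eq_true, if_true]
        symm
        simp only [decide_eq_true_eq]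
        refine pv_not_nodup_map_fst _ (pvGoalKey goal, previous) (pvGoalKey goal, pvGoalDir goal)
          ?_ ?_ (by simp [hpd]) rfl
        · rw [PySem.Set.mem_update]
          left
          rw [PySem.Set.mem_add]
          left
          exact PySem.Dict.mem_items_of_get?_eq_some d hg
        · rw [PySem.Set.mem_update]
          left
          rw [PySem.Set.mem_add]
          right
          rfl

-- ===== VERDICT (by name: the statement is the Claim_ definition above) =====
theorem has_conflicting_goal_directions_py_spec : Claim_equal_has_conflicting_goal_directions_py := by
  intro goals _
  unfold Spec_has_conflicting_goal_directions_py
  unfold has_conflicting_goal_directions_py has_conflicting_goal_directions_py_alt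
  rw [pv_main goals PySem.Dict.empty (by simp [PySem.Dict.empty, PySem.Dict.keys])]
  have hemp : (PySem.Dict.empty : PySem.Dict (String × String) String).items = [] := rfl
  rw [hemp, PySem.Set.update_nil_left]
  set S := PySem.Set.ofList (goals.map (fun g => (pvGoalKey g, pvGoalDir g))) with hS
  simp only [PySem.Set.len]
  by_cases h : (S.map Prod.fst).Nodup
  · rw [PySem.Set.ofList_eq_self_of_nodup (S.map Prod.fst) h]
    simp [h]
  · have h1 := pv_length_ofList_lt (S.map Prod.fst) h
    rw [List.length_map] at h1
    simp only [h, not_false_eq_true, decide_true]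
    symm
    simp only [decide_eq_true_eq]
    exact_mod_cast h1
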